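-- pv_equiv track=rewrite | github.com/dlvql/Algorithm | 프로그래머스/0/120871. 저주의 숫자 3/저주의 숫자 3.py | solution
-- ===== SOURCE A (Python) =====
-- def solution(n):
--     c = 0
--     i = 0
--     while c < n:
--         c += 1
--         i += 1
--         while '3' in list(str(i)) or i % 3 == 0:
--             i += 1
--     return i
-- ===== SOURCE B (Python) =====
-- def solution(n):
--     # Staged approach: repeatedly double an upper bound M, build the full list of
--     # valid numbers (no digit '3', not divisible by 3) up to M by filtering the
--     # range, and return the n-th once the list is long enough.
--     if n <= 0:
--         return 0  # no positive index requested
--     M = 1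
--     while True:
--         valid = [i for i in range(1, M + 1) if '3' not in str(i) and i % 3 != 0]
--         if len(valid) >= n:
--             return valid[n - 1]
--         M *= 2
-- ===== Notes on version B (the rewrite author's own statement) =====
-- stated objective: alternative
-- what changed: A interleaves counting with a nested skip-loop over successive integers; B instead repeatedly doubles an upper bound M, builds the whole list of valid numbers up to M by filtering range(1,M+1), and returns the (n-1)-th element of that list once it is long enough.
import Mathlib
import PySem

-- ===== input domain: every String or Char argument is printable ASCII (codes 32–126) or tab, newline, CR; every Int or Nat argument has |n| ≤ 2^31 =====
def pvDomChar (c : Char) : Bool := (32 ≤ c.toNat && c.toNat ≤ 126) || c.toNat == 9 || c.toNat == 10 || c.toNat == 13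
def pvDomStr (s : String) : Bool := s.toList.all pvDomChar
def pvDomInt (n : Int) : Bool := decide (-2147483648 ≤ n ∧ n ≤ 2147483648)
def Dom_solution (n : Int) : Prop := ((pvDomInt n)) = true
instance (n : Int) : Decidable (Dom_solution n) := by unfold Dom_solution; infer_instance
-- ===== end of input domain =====

-- B replaces A's interleaved count-and-skip pair of while loops by a staged computation:
-- double an upper bound M, filter range(1, M+1) down to the valid numbers, and index the
-- resulting list (objective: alternative — same O(result) cost, a different decomposition).
--
-- The helpers below (goodB, gap, and the pow-of-ten lemmas) exist only to justify TERMINATION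
-- of the loops in both ports (valid numbers of the form 10^k + 1 always lie ahead); they are
-- cited by the ports' decreasing_by proofs and take no part in the computation.

def goodB (i : Int) : Bool :=
  !(PySem.Int.toChars i).contains '3' && !(PySem.Int.mod i 3 == 0)

theorem digitChar_ne3 : ∀ m : Nat, m < 10 → m ≠ 3 → Nat.digitChar m ≠ '3' := by decide

theorem no3_toDigitsCore (fuel : Nat) : ∀ (n : Nat) (acc : List Char),
    (∀ d ∈ Nat.digits 10 n, d ≠ 3) → '3' ∉ acc → '3' ∉ Nat.toDigitsCore 10 fuel n acc := by
  induction fuel with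
  | zero => intro n acc _ hacc; exact hacc
  | succ f ih =>
    intro n acc hd hacc
    have hchar : Nat.digitChar (n % 10) ≠ '3' := by
      refine digitChar_ne3 _ (Nat.mod_lt _ (by norm_num)) ?_
      rcases Nat.eq_zero_or_pos n with h0 | h0
      · rw [h0]; decide
      · refine hd _ ?_
        rw [Nat.digits_def' (by norm_num : 1 < 10) h0]
        exact List.mem_cons_self
    rw [Nat.toDigitsCore]
    split
    · intro hmem
      rcases List.mem_cons.mp hmem with h | h
      · exact hchar h.symm
      · exact hacc h
    · rename_i hne0
      refine ih _ _ ?_ ?_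
      · intro d hdmem
        refine hd _ ?_
        have hn0 : Nat.digits 10 n = n % 10 :: Nat.digits 10 (n / 10) := by
          refine Nat.digits_def' (by norm_num : 1 < 10) ?_
          rcases Nat.eq_zero_or_pos n with h0 | h0
          · exact absurd (by rw [h0]) hne0
          · exact h0
        rw [hn0]
        exact List.mem_cons_of_mem _ hdmem
      · intro hmem
        rcases List.mem_cons.mp hmem with h | h
        · exact hchar h.symm
        · exact hacc h

theorem digits_pow10 (k : Nat) : ∀ d ∈ Nat.digits 10 (10 ^ k), d ≠ 3 := by
  induction k with
  | zero => intro d hd; simp at hd; omega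
  | succ m ih =>
    intro d hd
    rw [pow_succ] at hd
    rw [Nat.digits_def' (by norm_num : 1 < 10) (by positivity)] at hd
    rcases List.mem_cons.mp hd with h | h
    · simp [Nat.mul_mod_left] at h; omega
    · rw [Nat.mul_div_cancel _ (by norm_num : 0 < 10)] at h; exact ih d h

theorem digits_pow10_add_one (k : Nat) : ∀ d ∈ Nat.digits 10 (10 ^ k + 1), d ≠ 3 := by
  cases k with
  | zero => intro d hd; simp at hd; omega
  | succ m =>
    intro d hd
    rw [Nat.digits_def' (by norm_num : 1 < 10) (by positivity)] at hd
    have h1 : (10 ^ (m + 1) + 1) % 10 = 1 := by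
      rw [pow_succ]; omega
    have h2 : (10 ^ (m + 1) + 1) / 10 = 10 ^ m := by
      rw [pow_succ]; omega
    rw [h1, h2] at hd
    rcases List.mem_cons.mp hd with h | h
    · omega
    · exact digits_pow10 m d h

theorem pow10_emod3 (k : Nat) : (10 : Int) ^ k % 3 = 1 := by
  induction k with
  | zero => norm_num
  | succ m ihm => rw [pow_succ, Int.mul_emod, ihm]; decide

theorem good_pow10_add_one (k : Nat) : goodB ((10 : Int) ^ k + 1) = true := by
  have hnn : (0 : Int) ≤ 10 ^ k + 1 := by positivity
  have hcast : ((10 : Int) ^ k + 1) = ((10 ^ k + 1 : Nat) : Int) := by push_cast; ring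
  have htn : ((10 : Int) ^ k + 1).toNat = 10 ^ k + 1 := by rw [hcast, Int.toNat_natCast]
  have hmem : '3' ∉ PySem.Int.toChars ((10 : Int) ^ k + 1) := by
    rw [PySem.Int.toChars, if_neg (Int.not_lt.mpr hnn), htn, Nat.toDigits]
    exact no3_toDigitsCore _ _ _ (digits_pow10_add_one k) (List.not_mem_nil)
  have hmod : PySem.Int.mod ((10 : Int) ^ k + 1) 3 ≠ 0 := by
    rw [Ne, PySem.Int.mod_eq_zero_iff_dvd, Int.dvd_iff_emod_eq_zero]
    have hp := pow10_emod3 k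
    omega
  simp only [goodB, Bool.and_eq_true, Bool.not_eq_true', beq_eq_false_iff_ne]
  constructor
  · simpa using hmem
  · exact hmod

theorem exists_good (i : Int) : ∃ k : Nat, goodB (i + k) = true := by
  refine ⟨((10 : Int) ^ (i.toNat + 1) + 1 - i).toNat, ?_⟩
  have hgt : i < (10 : Int) ^ (i.toNat + 1) + 1 := by
    rcases (by omega : i ≤ 0 ∨ 0 < i) with h | h
    · have : (0 : Int) < 10 ^ (i.toNat + 1) + 1 := by positivity
      omega
    · have h1 : (i.toNat : Int) = i := Int.toNat_of_nonneg h.le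
      have h2 : i.toNat < 10 ^ (i.toNat + 1) := by
        calc i.toNat < 10 ^ i.toNat := Nat.lt_pow_self (by norm_num)
        _ ≤ 10 ^ (i.toNat + 1) := Nat.pow_le_pow_right (by norm_num) (by omega)
      have h3 : (i.toNat : Int) < ((10 ^ (i.toNat + 1) : Nat) : Int) := by exact_mod_cast h2
      push_cast at h3
      omega
  have : i + (((10 : Int) ^ (i.toNat + 1) + 1 - i).toNat : Int) = (10 : Int) ^ (i.toNat + 1) + 1 := by
    rw [Int.toNat_of_nonneg (by omega)]; ring
  rw [this]
  exact good_pow10_add_one _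

def gap (i : Int) : Nat := Nat.find (exists_good i)

theorem gap_spec (i : Int) : goodB (i + gap i) = true := Nat.find_spec (exists_good i)

theorem gap_succ (i : Int) (h : goodB i = false) : gap i = gap (i + 1) + 1 := by
  have hs := gap_spec i
  have hpos : gap i ≠ 0 := by
    intro h0; rw [h0] at hs; simp at hs; rw [hs] at h; cases h
  have hle1 : gap (i + 1) ≤ gap i - 1 := by
    apply Nat.find_min'
    have : i + 1 + ((gap i - 1 : Nat) : Int) = i + gap i := by
      have : (1 : Nat) ≤ gap i := Nat.one_le_iff_ne_zero.mpr hpos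
      push_cast [Nat.cast_sub this]
      ring
    rw [this]; exact hs
  have hle2 : gap i ≤ gap (i + 1) + 1 := by
    apply Nat.find_min'
    have : i + ((gap (i + 1) + 1 : Nat) : Int) = (i + 1) + gap (i + 1) := by push_cast; ring
    rw [this]; exact gap_spec (i + 1)
  omega

theorem bad_of_contains (x : Int) (h : (PySem.Int.toChars x).contains '3' = true) :
    goodB x = false := by rw [goodB, h]; rfl

theorem bad_of_mod0 (x : Int) (h : PySem.Int.mod x 3 = 0) : goodB x = false := by
  rw [goodB, h]; simp

-- ===== PORT A =====
def skipBad (i : Int) : Int :=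
  if (PySem.Int.toChars i).contains '3' || PySem.Int.mod i 3 == 0 then skipBad (i + 1) else i
termination_by gap i
decreasing_by
  rename_i h
  have hb : goodB i = false := by
    simp only [Bool.or_eq_true, beq_iff_eq] at h
    rcases h with h | h
    · exact bad_of_contains _ h
    · exact bad_of_mod0 _ h
  rw [gap_succ i hb]
  omega

def loopA (n c i : Int) : Int :=
  if c < n then loopA n (c + 1) (skipBad (i + 1)) else i
termination_by (n - c).toNat
decreasing_by omega

def solution (n : Int) : Int := loopA n 0 0

-- ===== PORT B =====
-- Python B's filter condition: `'3' not in str(i) and i % 3 != 0`.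
def okB (i : Int) : Bool :=
  !(PySem.Str.isIn "3" (PySem.Int.toStr i)) && !(PySem.Int.mod i 3 == 0)

-- the list comprehension [i for i in range(1, M+1) if ...]
def vList (M : Int) : List Int := (PySem.List.pyRange 1 (M + 1) 1).filter okB

-- Bridge (needed for loopB's termination): B's condition coincides with goodB.
-- Exact: the needle "3" is a single character, so substring test = char membership.
theorem isIn3_eq_contains (x : Int) :
    PySem.Str.isIn "3" (PySem.Int.toStr x) = (PySem.Int.toChars x).contains '3' := by
  rw [Bool.eq_iff_iff, PySem.Str.isIn_iff_infix, PySem.Int.toList_toStr]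
  have h3 : ("3" : String).toList = ['3'] := rfl
  rw [h3, List.singleton_infix_iff]
  simp

theorem okB_eq_goodB (x : Int) : okB x = goodB x := by
  rw [okB, goodB, isIn3_eq_contains]

-- Prefix structure of vList (also used by the proofs below).
theorem vList_prefix (X Y : Int) (h0 : 0 ≤ X) (hXY : X ≤ Y) :
    ∃ t, vList Y = vList X ++ t := by
  rw [vList, vList, PySem.List.pyRange_one_append 1 (X + 1) (Y + 1) (by omega) (by omega),
    List.filter_append]
  exact ⟨_, rfl⟩

theorem mem_vList (y M : Int) : y ∈ vList M ↔ 1 ≤ y ∧ y ≤ M ∧ okB y = true := by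
  rw [vList, List.mem_filter, PySem.List.mem_pyRange_one]
  constructor
  · rintro ⟨⟨h1, h2⟩, h3⟩; exact ⟨h1, by omega, h3⟩
  · rintro ⟨h1, h2, h3⟩; exact ⟨⟨h1, by omega⟩, h3⟩

-- Termination bound for loopB: up to 10^(n.toNat) + 1 there are at least n valid numbers.
theorem count_bound (n : Int) : n ≤ ((vList ((10 : Int) ^ n.toNat + 1)).length : Int) := by
  set k := n.toNat with hk
  set X := (10 : Int) ^ k + 1 with hX
  have hsub : (List.range (k + 1)).map (fun j => (10 : Int) ^ j + 1) ⊆ vList X := by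
    intro y hy
    rcases List.mem_map.mp hy with ⟨j, hj, rfl⟩
    have hjk : j ≤ k := by simpa [Nat.lt_succ_iff] using List.mem_range.mp hj
    have hmono : (10 : Int) ^ j ≤ 10 ^ k := pow_le_pow_right₀ (by norm_num) hjk
    have hpos : (0 : Int) < 10 ^ j := by positivity
    refine (mem_vList _ _).mpr ⟨by omega, by omega, ?_⟩
    rw [okB_eq_goodB]; exact good_pow10_add_one j
  have hnd : ((List.range (k + 1)).map (fun j => (10 : Int) ^ j + 1)).Nodup := by
    refine List.Nodup.map ?_ (List.nodup_range)
    intro a b hab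
    simp only at hab
    have h10 : (10 : Int) ^ a = 10 ^ b := by omega
    have h10' : (10 : Nat) ^ a = 10 ^ b := by exact_mod_cast h10
    exact Nat.pow_right_injective (by norm_num) h10'
  have hlen := (List.subperm_of_subset hnd hsub).length_le
  rw [List.length_map, List.length_range] at hlen
  have hln : ((k + 1 : Nat) : Int) ≤ ((vList X).length : Int) := by exact_mod_cast hlen
  have hkn : k = n.toNat := hk
  push_cast at hln
  omega

def loopB (n M : Int) (hM : 1 ≤ M) : Int :=
  if n ≤ ((vList M).length : Int) then (PySem.List.pyGet? (vList M) (n - 1)).getD 0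
  else loopB n (M * 2) (by omega)
termination_by ((10 : Int) ^ n.toNat + 1 - M).toNat
decreasing_by
  rename_i h
  have hb := count_bound n
  have hP : (1 : Int) ≤ (10 : Int) ^ n.toNat := one_le_pow₀ (by norm_num)
  have hMlt : M < (10 : Int) ^ n.toNat + 1 := by
    by_contra hge
    have hge : (10 : Int) ^ n.toNat + 1 ≤ M := by omega
    rcases vList_prefix ((10 : Int) ^ n.toNat + 1) M (by omega) hge with ⟨t, ht⟩
    have : (vList ((10 : Int) ^ n.toNat + 1)).length ≤ (vList M).length := by
      rw [ht, List.length_append]; omega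
    omega
  omega

def solution_alt (n : Int) : Int :=
  if n ≤ 0 then 0 else loopB n 1 (by norm_num)

-- ===== PRECONDITION & SPEC =====
def Spec_solution (n : Int) (out : Int) : Prop := out = solution_alt n
instance (n : Int) (out : Int) : Decidable (Spec_solution n out) := by unfold Spec_solution; infer_instance

-- ===== CLAIM =====
def Claim_equal_solution : Prop := ∀ (n : Int), Dom_solution n → Spec_solution n (solution n)

-- ===== LEMMAS AND PROOFS =====

-- Minimality of gap.
theorem gap_min (x : Int) (k : Nat) (h : k < gap x) : goodB (x + k) = false :=
  Bool.eq_false_iff.mpr (Nat.find_min (exists_good x) h)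

-- skipBad jumps exactly to the nearest valid number.
theorem skipBad_eq (x : Int) : skipBad x = x + gap x := by
  induction x using skipBad.induct with
  | case1 x h ih =>
    have hb : goodB x = false := by
      simp only [Bool.or_eq_true, beq_iff_eq] at h
      rcases h with h | h
      · exact bad_of_contains _ h
      · exact bad_of_mod0 _ h
    rw [skipBad, if_pos (by simpa [goodB] using h), ih, gap_succ x hb]
    push_cast
    ring
  | case2 x h =>
    have hg : goodB x = true := by
      simp only [Bool.or_eq_true, beq_iff_eq, not_or, Bool.not_eq_true] at h
      rw [goodB, h.1]
      simp only [Bool.not_false, Bool.true_and, Bool.not_eq_true', beq_eq_false_iff_ne]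
      exact h.2
    have h0 : gap x = 0 := (Nat.find_eq_zero _).mpr (by simpa using hg)
    rw [skipBad, if_neg h, h0]
    simp

theorem skipBad_good (x : Int) : goodB (skipBad x) = true := by
  rw [skipBad_eq]; exact gap_spec x

theorem skipBad_ge (x : Int) : x ≤ skipBad x := by
  rw [skipBad_eq]; omega

-- cnt X = how many valid numbers lie in [1, X].
def cnt (X : Int) : Nat := (vList X).length

theorem vList_succ (X : Int) (h : 0 ≤ X) :
    vList (X + 1) = vList X ++ (if okB (X + 1) then [X + 1] else []) := by
  rw [vList, vList, PySem.List.pyRange_one_succ_right (by omega : (1 : Int) ≤ X + 1),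
    List.filter_append]
  congr 1
  cases hok : okB (X + 1) <;> simp [hok]

theorem cnt_succ (X : Int) (h : 0 ≤ X) :
    cnt (X + 1) = cnt X + (if goodB (X + 1) then 1 else 0) := by
  rw [cnt, cnt, vList_succ X h, List.length_append, okB_eq_goodB]
  cases goodB (X + 1) <;> simp

theorem cnt_flat (m : Nat) : ∀ (y : Int), 0 ≤ y →
    (∀ k : Nat, k < m → goodB (y + 1 + k) = false) → cnt (y + m) = cnt y := by
  induction m with
  | zero => intro y _ _; simp
  | succ m ih =>
    intro y hy hb
    have hbad : goodB (y + (m : Int) + 1) = false := by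
      have h1 := hb m (Nat.lt_succ_self m)
      have e : y + 1 + (m : Int) = y + (m : Int) + 1 := by ring
      rwa [e] at h1
    have hs := cnt_succ (y + m) (by omega)
    rw [hbad] at hs
    simp at hs
    have e2 : y + ((m + 1 : Nat) : Int) = (y + (m : Int)) + 1 := by push_cast; ring
    rw [e2, hs]
    exact ih y hy (fun k hk => hb k (Nat.lt_succ_of_lt hk))

theorem cnt_skip (x : Int) (hx : 0 ≤ x) : cnt (skipBad (x + 1)) = cnt x + 1 := by
  have hflat : cnt (x + (gap (x + 1) : Int)) = cnt x :=
    cnt_flat (gap (x + 1)) x hx (fun k hk => gap_min (x + 1) k hk)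
  have hg : goodB (x + (gap (x + 1) : Int) + 1) = true := by
    have h1 := gap_spec (x + 1)
    rwa [show (x + 1) + (gap (x + 1) : Int) = x + (gap (x + 1) : Int) + 1 by ring] at h1
  have hs := cnt_succ (x + (gap (x + 1) : Int)) (by omega)
  rw [hg] at hs
  simp at hs
  rw [skipBad_eq, show (x + 1) + (gap (x + 1) : Int) = x + (gap (x + 1) : Int) + 1 by ring,
    hs, hflat]

theorem cnt_zero : cnt 0 = 0 := by
  rw [cnt, vList, PySem.List.pyRange_one_eq_nil (by norm_num)]
  rfl

-- A's outer loop maintains: i is the (cnt i)-th valid number.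
theorem loopA_inv (n : Int) : ∀ (c i : Int), 0 ≤ i → (cnt i : Int) = c → c ≤ n →
    (0 < c → goodB i = true ∧ 1 ≤ i) → 0 < n →
    goodB (loopA n c i) = true ∧ 1 ≤ loopA n c i ∧ (cnt (loopA n c i) : Int) = n := by
  intro c i
  induction c, i using loopA.induct n with
  | case1 c i hcn ih =>
    intro hi hcnt hcle _ hn
    rw [loopA, if_pos hcn]
    refine ih ?_ ?_ ?_ ?_ hn
    · have := skipBad_ge (i + 1); omega
    · rw [cnt_skip i hi]; push_cast; omega
    · omega
    · intro _
      exact ⟨skipBad_good (i + 1), by have := skipBad_ge (i + 1); omega⟩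
  | case2 c i hcn =>
    intro _ hcnt hcle hpos hn
    rw [loopA, if_neg hcn]
    have hc : c = n := by omega
    exact ⟨(hpos (by omega)).1, (hpos (by omega)).2, by omega⟩

theorem vList_pairwise (M : Int) : (vList M).Pairwise (· < ·) :=
  List.Pairwise.filter _ (PySem.List.pairwise_lt_pyRange_one 1 (M + 1))

-- The element valid[n-1] of B is a valid number with exactly n valid numbers ≤ it.
theorem B_result (n M : Int) (hn : 0 < n) (h : n ≤ ((vList M).length : Int)) :
    goodB ((PySem.List.pyGet? (vList M) (n - 1)).getD 0) = true ∧
    1 ≤ (PySem.List.pyGet? (vList M) (n - 1)).getD 0 ∧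
    (cnt ((PySem.List.pyGet? (vList M) (n - 1)).getD 0) : Int) = n := by
  have hkl : (n - 1).toNat < (vList M).length := by omega
  have hget : PySem.List.pyGet? (vList M) (n - 1) = some (vList M)[(n - 1).toNat] := by
    conv_lhs => rw [show (n - 1 : Int) = ((n - 1).toNat : Int) by omega]
    rw [PySem.List.pyGet?_natCast]
    exact List.getElem?_eq_getElem hkl
  rw [hget, Option.getD_some]
  obtain ⟨hr1, hrM, hok⟩ := (mem_vList _ M).mp (List.getElem_mem hkl)
  have hrg : goodB (vList M)[(n - 1).toNat] = true := by rwa [okB_eq_goodB] at hok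
  refine ⟨hrg, hr1, ?_⟩
  obtain ⟨t, ht⟩ := vList_prefix (vList M)[(n - 1).toNat] M (by omega) hrM
  have hlen := congrArg List.length ht
  rw [List.length_append] at hlen
  have hpw := List.pairwise_iff_getElem.mp (vList_pairwise M)
  have hpref : ∀ (j : Nat) (hj : j < (vList (vList M)[(n - 1).toNat]).length),
      (vList (vList M)[(n - 1).toNat])[j] = (vList M)[j]'(by omega) := by
    intro j hj
    conv_rhs => rw [List.getElem_of_eq ht]
    rw [List.getElem_append_left hj]
  have hrmem : (vList M)[(n - 1).toNat] ∈ vList (vList M)[(n - 1).toNat] :=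
    (mem_vList _ _).mpr ⟨hr1, le_refl _, hok⟩
  obtain ⟨j0, hj0, hj0e⟩ := List.mem_iff_getElem.mp hrmem
  have hj0len : j0 < (vList M).length := by omega
  have hj0k : j0 = (n - 1).toNat := by
    by_contra hne
    rcases Nat.lt_or_ge j0 (n - 1).toNat with hlt | hge
    · have hcmp := hpw j0 (n - 1).toNat hj0len hkl hlt
      rw [← hpref j0 hj0, hj0e] at hcmp
      exact absurd hcmp (lt_irrefl _)
    · have hlt2 : (n - 1).toNat < j0 := by omega
      have hcmp := hpw (n - 1).toNat j0 hkl hj0len hlt2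
      rw [← hpref j0 hj0, hj0e] at hcmp
      exact absurd hcmp (lt_irrefl _)
  have hklt : (n - 1).toNat < (vList (vList M)[(n - 1).toNat]).length := hj0k ▸ hj0
  have hlast : (vList (vList M)[(n - 1).toNat]).length - 1 ≤ (n - 1).toNat := by
    by_contra hgt
    have ht1 : (n - 1).toNat < (vList (vList M)[(n - 1).toNat]).length - 1 := by omega
    have ht1len : (vList (vList M)[(n - 1).toNat]).length - 1 <
        (vList (vList M)[(n - 1).toNat]).length := by omega
    have ht1lenM : (vList (vList M)[(n - 1).toNat]).length - 1 < (vList M).length := by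
      omega
    have hcmp := hpw (n - 1).toNat _ hkl ht1lenM ht1
    have hle : (vList M)[(vList (vList M)[(n - 1).toNat]).length - 1]'ht1lenM ≤
        (vList M)[(n - 1).toNat] := by
      have hmem2 := List.getElem_mem ht1len
      rw [hpref _ ht1len] at hmem2
      exact ((mem_vList _ _).mp hmem2).2.1
    omega
  have hcnt : cnt (vList M)[(n - 1).toNat] = (n - 1).toNat + 1 := by
    rw [cnt]; omega
  rw [hcnt]; omega

theorem loopB_prop (n : Int) (hn : 0 < n) : ∀ (M : Int) (hM : 1 ≤ M),
    goodB (loopB n M hM) = true ∧ 1 ≤ loopB n M hM ∧ (cnt (loopB n M hM) : Int) = n := by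
  intro M hM
  induction M, hM using loopB.induct n with
  | case1 M hM h => rw [loopB, if_pos h]; exact B_result n M hn h
  | case2 M hM h ih => rw [loopB, if_neg h]; exact ih

theorem cnt_mono (X Y : Int) (h0 : 0 ≤ X) (h : X ≤ Y) : cnt X ≤ cnt Y := by
  obtain ⟨t, ht⟩ := vList_prefix X Y h0 h
  rw [cnt, cnt, ht, List.length_append]
  omega

theorem cnt_lt (r r' : Int) (h1 : 1 ≤ r) (hlt : r < r') (hg' : goodB r' = true) :
    cnt r < cnt r' := by
  have hm : cnt r ≤ cnt (r' - 1) := cnt_mono r (r' - 1) (by omega) (by omega)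
  have hs := cnt_succ (r' - 1) (by omega)
  rw [show (r' - 1) + 1 = r' by ring, hg'] at hs
  simp at hs
  omega

theorem good_unique (r r' : Int) (h1 : 1 ≤ r) (h1' : 1 ≤ r') (hg : goodB r = true)
    (hg' : goodB r' = true) (hc : cnt r = cnt r') : r = r' := by
  rcases lt_trichotomy r r' with hlt | heq | hlt
  · have := cnt_lt r r' h1 hlt hg'; omega
  · exact heq
  · have := cnt_lt r' r h1' hlt hg; omega

-- ===== VERDICT =====
theorem solution_spec : Claim_equal_solution := by
  intro n _
  unfold Spec_solution
  rcases (by omega : n ≤ 0 ∨ 0 < n) with h | h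
  · rw [solution, solution_alt, loopA, if_neg (by omega), if_pos h]
  · rw [solution, solution_alt, if_neg (by omega)]
    have hA := loopA_inv n 0 0 (le_refl 0) (by rw [cnt_zero]; rfl) (by omega)
      (fun h0 => absurd h0 (lt_irrefl 0)) h
    have hB := loopB_prop n h 1 (le_refl 1)
    exact good_unique _ _ hA.2.1 hB.2.1 hA.1 hB.1 (by omega)
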